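-- pv_equiv track=rewrite | github.com/onaeonae1/ProblemSolving | Programmers/기능개발.py | parse_day_list
-- ===== SOURCE A (Python) =====
-- def parse_day_list(temp_list):
--     max_val = temp_list[0]
--     ret = 1
--     ret_list = []
--     temp_list.append(99999)
--     for i in range(0, len(temp_list)-1):
--         if temp_list[i+1] > max_val:
--             max_val = temp_list[i+1]
--             ret_list.append(ret)
--             ret = 1
--         else:
--             ret = ret + 1
--
--     return ret_list
-- ===== SOURCE B (Python) =====
-- def parse_day_list(temp_list):
--     m = temp_list[0]
--     temp_list.append(99999)
--     # pass 1: running-maximum array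
--     rm = []
--     for x in temp_list:
--         if x > m:
--             m = x
--         rm.append(m)
--     # pass 2: positions where the running maximum strictly increases
--     bounds = [i for i in range(1, len(rm)) if rm[i] != rm[i - 1]]
--     # pass 3: gap lengths between consecutive boundary positions
--     return [b - p for p, b in zip([0] + bounds, bounds)]
-- ===== Notes on version B (the rewrite author's own statement) =====
-- stated objective: alternative
-- what changed: A's single stateful scan carrying a running counter and flushing it on each new maximum is replaced by three staged passes: build the running-maximum array, filter the positions where it strictly increases, and map consecutive positions (zip with shift) to gap lengths.
import Mathlib
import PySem

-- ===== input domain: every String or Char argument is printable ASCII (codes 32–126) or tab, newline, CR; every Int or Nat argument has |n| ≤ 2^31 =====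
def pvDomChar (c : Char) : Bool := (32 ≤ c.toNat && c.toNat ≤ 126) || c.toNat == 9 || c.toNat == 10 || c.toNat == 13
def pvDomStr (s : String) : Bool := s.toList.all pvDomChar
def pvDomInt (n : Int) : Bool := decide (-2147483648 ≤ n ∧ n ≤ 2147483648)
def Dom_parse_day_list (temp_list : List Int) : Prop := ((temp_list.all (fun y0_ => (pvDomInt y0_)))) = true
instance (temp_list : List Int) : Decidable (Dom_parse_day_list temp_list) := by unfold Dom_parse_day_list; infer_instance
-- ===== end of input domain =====

-- B replaces A's single stateful counting scan by three staged passes: build the running-maximum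
-- array, filter the positions where it strictly increases, and map consecutive positions to gap
-- lengths (alternative decomposition, same return value).
-- Both A and B mutate the argument (append 99999); the equivalence proved here is about the return value.

-- ===== PORT A =====
def parse_day_list (temp_list : List Int) : List Int :=
  match PySem.List.pyGet? temp_list 0 with
  | none => []   -- Python raises IndexError here; excluded by Pre_
  | some m0 =>
    let tl := temp_list ++ [99999]
    let s := (PySem.List.pyRange 0 (PySem.List.len tl - 1)).foldl
      (fun (st : Int × Int × List Int) i =>
        if PySem.List.pyGetD tl (i + 1) 0 > st.1 then
          (PySem.List.pyGetD tl (i + 1) 0, 1, st.2.2 ++ [st.2.1])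
        else (st.1, st.2.1 + 1, st.2.2))
      (m0, 1, ([] : List Int))
    s.2.2

-- ===== PORT B =====
def parse_day_list_alt (temp_list : List Int) : List Int :=
  match PySem.List.pyGet? temp_list 0 with
  | none => []   -- Python raises IndexError here; excluded by Pre_
  | some m0 =>
    let tl := temp_list ++ [99999]
    -- pass 1: running-maximum array
    let rm := (tl.foldl (fun (st : Int × List Int) x =>
        let m' := if x > st.1 then x else st.1
        (m', st.2 ++ [m'])) (m0, ([] : List Int))).2
    -- pass 2: positions where the running maximum strictly increases
    let bounds := (PySem.List.pyRange 1 (PySem.List.len rm)).filter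
        (fun i => PySem.List.pyGetD rm i 0 != PySem.List.pyGetD rm (i - 1) 0)
    -- pass 3: gap lengths between consecutive boundary positions
    ((0 :: bounds).zip bounds).map (fun pb => pb.2 - pb.1)

-- ===== PRECONDITION & SPEC =====
-- Pre_ excludes only the empty list, on which Python A raises IndexError reading the first element (B raises there too).
def Pre_parse_day_list (temp_list : List Int) : Prop := temp_list ≠ []
instance (temp_list : List Int) : Decidable (Pre_parse_day_list temp_list) := by unfold Pre_parse_day_list; infer_instance
def pvWitness_parse_day_list : List Int := ([1, 3, 2])

def Spec_parse_day_list (temp_list : List Int) (out : List Int) : Prop := out = parse_day_list_alt temp_list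
instance (temp_list : List Int) (out : List Int) : Decidable (Spec_parse_day_list temp_list out) := by unfold Spec_parse_day_list; infer_instance

-- ===== CLAIM (what is proved, stated in full; the proofs are below) =====
def Claim_equal_parse_day_list : Prop := ∀ (temp_list : List Int), Dom_parse_day_list temp_list → Pre_parse_day_list temp_list → Spec_parse_day_list temp_list (parse_day_list temp_list)

-- ===== LEMMAS AND PROOFS =====

-- Proof-only helper: the running-maximum list produced by B's first pass.
def pvRunmax (m : Int) : List Int → List Int
  | [] => []
  | x :: xs => let m' := if x > m then x else m; m' :: pvRunmax m' xs

-- Proof-only helper: the final running maximum (first component of B's first fold).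
def pvLastMax (m : Int) : List Int → Int
  | [] => m
  | x :: xs => pvLastMax (if x > m then x else m) xs

-- B's first fold computes (final max, acc ++ running-maximum list).
theorem pv_rmfold (tl : List Int) : ∀ (m : Int) (acc : List Int),
    tl.foldl (fun (st : Int × List Int) x =>
        let m' := if x > st.1 then x else st.1
        (m', st.2 ++ [m'])) (m, acc) = (pvLastMax m tl, acc ++ pvRunmax m tl) := by
  induction tl with
  | nil => intro m acc; simp [pvLastMax, pvRunmax]
  | cons x xs ih => intro m acc; simp [pvLastMax, pvRunmax, ih]

theorem pvRunmax_length (tl : List Int) : ∀ m : Int, (pvRunmax m tl).length = tl.length := by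
  induction tl with
  | nil => intro m; simp [pvRunmax]
  | cons x xs ih => intro m; simp [pvRunmax, ih]

-- Entry-wise recurrence of the running-maximum list.
theorem pvRunmax_getD_succ : ∀ (i : Nat) (m : Int) (tl : List Int), i + 1 < tl.length →
    (pvRunmax m tl).getD (i + 1) 0 =
      if tl.getD (i + 1) 0 > (pvRunmax m tl).getD i 0 then tl.getD (i + 1) 0
      else (pvRunmax m tl).getD i 0 := by
  intro i
  induction i with
  | zero =>
    intro m tl h
    match tl with
    | x :: y :: ys => simp [pvRunmax]
  | succ i ih =>
    intro m tl h
    match tl with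
    | x :: xs =>
      have hx : i + 1 < xs.length := by simpa using h
      simpa [pvRunmax] using ih (if x > m then x else m) xs hx

-- The zip-with-shift diff map equals a fold carrying the previous boundary.
theorem pv_zipdiff (B : List Int) : ∀ (prev : Int) (acc : List Int),
    (B.foldl (fun (st : Int × List Int) b => (b, st.2 ++ [b - st.1])) (prev, acc)).2
      = acc ++ ((prev :: B).zip B).map (fun pb => pb.2 - pb.1) := by
  induction B with
  | nil => intro prev acc; simp
  | cons b B' ih => intro prev acc; simp [ih]

-- Core invariant: after k steps, A's (max, ret, out) corresponds to B's structures on the prefix: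
-- max = rm[k], out = diff-fold of the boundary positions ≤ k, ret = k+1 - last boundary.
theorem pv_key (tl rm : List Int) (m0 : Int)
    (h0 : rm.getD 0 0 = m0)
    (hrec : ∀ i : Nat, i + 1 < tl.length →
      rm.getD (i + 1) 0 = if tl.getD (i + 1) 0 > rm.getD i 0 then tl.getD (i + 1) 0 else rm.getD i 0) :
    ∀ k : Nat, k < tl.length →
    (((PySem.List.pyRange 0 (k : Int)).foldl
      (fun (st : Int × Int × List Int) i =>
        if PySem.List.pyGetD tl (i + 1) 0 > st.1 then
          (PySem.List.pyGetD tl (i + 1) 0, 1, st.2.2 ++ [st.2.1])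
        else (st.1, st.2.1 + 1, st.2.2)) (m0, 1, ([] : List Int))).1 = rm.getD k 0)
    ∧ (((PySem.List.pyRange 0 (k : Int)).foldl
      (fun (st : Int × Int × List Int) i =>
        if PySem.List.pyGetD tl (i + 1) 0 > st.1 then
          (PySem.List.pyGetD tl (i + 1) 0, 1, st.2.2 ++ [st.2.1])
        else (st.1, st.2.1 + 1, st.2.2)) (m0, 1, ([] : List Int))).2.2
      = (((PySem.List.pyRange 1 ((k : Int) + 1)).filter
          (fun i => PySem.List.pyGetD rm i 0 != PySem.List.pyGetD rm (i - 1) 0)).foldl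
          (fun (st : Int × List Int) b => (b, st.2 ++ [b - st.1])) (0, ([] : List Int))).2)
    ∧ (((PySem.List.pyRange 0 (k : Int)).foldl
      (fun (st : Int × Int × List Int) i =>
        if PySem.List.pyGetD tl (i + 1) 0 > st.1 then
          (PySem.List.pyGetD tl (i + 1) 0, 1, st.2.2 ++ [st.2.1])
        else (st.1, st.2.1 + 1, st.2.2)) (m0, 1, ([] : List Int))).2.1
      = (k : Int) + 1 - (((PySem.List.pyRange 1 ((k : Int) + 1)).filter
          (fun i => PySem.List.pyGetD rm i 0 != PySem.List.pyGetD rm (i - 1) 0)).foldl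
          (fun (st : Int × List Int) b => (b, st.2 ++ [b - st.1])) (0, ([] : List Int))).1) := by
  intro k
  induction k with
  | zero =>
    intro _
    simp [PySem.List.pyRange, ← h0, List.getD]
  | succ k ih =>
    intro hk1
    have hklt : k < tl.length := by omega
    obtain ⟨h1, h2, h3⟩ := ih hklt
    have ra : PySem.List.pyRange 0 ((k + 1 : Nat) : Int) = PySem.List.pyRange 0 (k : Int) ++ [(k : Int)] := by
      push_cast
      exact PySem.List.pyRange_one_succ_right (by positivity)
    have rb : PySem.List.pyRange 1 (((k + 1 : Nat) : Int) + 1) = PySem.List.pyRange 1 ((k : Int) + 1) ++ [(k : Int) + 1] := by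
      push_cast
      exact PySem.List.pyRange_one_succ_right (by omega)
    have hgtl : PySem.List.pyGetD tl ((k : Int) + 1) 0 = tl.getD (k + 1) 0 := by
      have : ((k : Int) + 1) = ((k + 1 : Nat) : Int) := by push_cast; ring
      rw [this, PySem.List.pyGetD_natCast]
    have hgrm1 : PySem.List.pyGetD rm ((k : Int) + 1) 0 = rm.getD (k + 1) 0 := by
      have : ((k : Int) + 1) = ((k + 1 : Nat) : Int) := by push_cast; ring
      rw [this, PySem.List.pyGetD_natCast]
    have hgrm0 : PySem.List.pyGetD rm ((k : Int) + 1 - 1) 0 = rm.getD k 0 := by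
      have : ((k : Int) + 1 - 1) = ((k : Nat) : Int) := by ring
      rw [this, PySem.List.pyGetD_natCast]
    have hrk := hrec k (by simpa using hk1)
    rw [ra, rb]
    simp only [List.foldl_append, List.foldl_cons, List.foldl_nil, List.filter_append]
    by_cases hc : tl.getD (k + 1) 0 > rm.getD k 0
    · have hne : rm.getD (k + 1) 0 ≠ rm.getD k 0 := by
        rw [hrk, if_pos hc]; omega
      have hpred : (PySem.List.pyGetD rm ((k : Int) + 1) 0 != PySem.List.pyGetD rm ((k : Int) + 1 - 1) 0) = true := by
        rw [hgrm0, hgrm1]; simpa using hne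
      have hfil : List.filter (fun i => PySem.List.pyGetD rm i 0 != PySem.List.pyGetD rm (i - 1) 0) [(k : Int) + 1] = [(k : Int) + 1] := by
        simp only [List.filter_cons, List.filter_nil]
        rw [hpred]
        simp
      rw [hfil]
      simp only [List.foldl_cons, List.foldl_nil]
      rw [hgtl, h1, if_pos hc]
      refine ⟨?_, ?_, ?_⟩
      · rw [hrk, if_pos hc]
      · rw [h2, h3]
      · show (1 : Int) = ((k + 1 : Nat) : Int) + 1 - ((k : Int) + 1)
        push_cast; ring
    · have heq : rm.getD (k + 1) 0 = rm.getD k 0 := by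
        rw [hrk, if_neg hc]
      have hpred : (PySem.List.pyGetD rm ((k : Int) + 1) 0 != PySem.List.pyGetD rm ((k : Int) + 1 - 1) 0) = false := by
        rw [hgrm0, hgrm1]; simpa using heq
      have hfil : List.filter (fun i => PySem.List.pyGetD rm i 0 != PySem.List.pyGetD rm (i - 1) 0) [(k : Int) + 1] = [] := by
        simp only [List.filter_cons, List.filter_nil]
        rw [hpred]
        simp
      rw [hfil]
      simp only [List.foldl_nil]
      rw [hgtl, h1, if_neg hc]
      refine ⟨?_, h2, ?_⟩
      · rw [hrk, if_neg hc]
      · show (List.foldl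
            (fun (st : Int × Int × List Int) i =>
              if PySem.List.pyGetD tl (i + 1) 0 > st.1 then
                (PySem.List.pyGetD tl (i + 1) 0, 1, st.2.2 ++ [st.2.1])
              else (st.1, st.2.1 + 1, st.2.2)) (m0, 1, ([] : List Int)) (PySem.List.pyRange 0 (k : Int))).2.1 + 1
            = ((k + 1 : Nat) : Int) + 1 - (((PySem.List.pyRange 1 ((k : Int) + 1)).filter
              (fun i => PySem.List.pyGetD rm i 0 != PySem.List.pyGetD rm (i - 1) 0)).foldl
              (fun (st : Int × List Int) b => (b, st.2 ++ [b - st.1])) (0, ([] : List Int))).1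
        rw [h3]
        push_cast; ring

-- ===== VERDICT (by name: the statement is the Claim_ definition above) =====
theorem parse_day_list_spec : Claim_equal_parse_day_list := by
  intro temp_list _ hpre
  unfold Spec_parse_day_list parse_day_list parse_day_list_alt
  obtain ⟨x, xs, rfl⟩ : ∃ x xs, temp_list = x :: xs := by
    cases temp_list with
    | nil => exact absurd rfl hpre
    | cons x xs => exact ⟨x, xs, rfl⟩
  have h0 : PySem.List.pyGet? (x :: xs) 0 = some x := by simp [PySem.List.pyGet?, PySem.List.pyIdx?]
  rw [h0]
  simp only
  rw [pv_rmfold]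
  simp only [List.nil_append]
  set tl : List Int := (x :: xs) ++ [99999] with htl
  set rm : List Int := pvRunmax x tl with hrm
  have hlen : rm.length = tl.length := pvRunmax_length tl x
  have hrm0 : rm.getD 0 0 = x := by
    rw [hrm, htl]; simp [pvRunmax]
  have hrec : ∀ i : Nat, i + 1 < tl.length →
      rm.getD (i + 1) 0 = if tl.getD (i + 1) 0 > rm.getD i 0 then tl.getD (i + 1) 0 else rm.getD i 0 := by
    intro i hi; exact pvRunmax_getD_succ i x tl hi
  have hk : xs.length + 1 < tl.length := by simp [htl]
  have key := pv_key tl rm x hrm0 hrec (xs.length + 1) hk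
  have hlenA : PySem.List.len tl - 1 = ((xs.length + 1 : Nat) : Int) := by
    simp [PySem.List.len_eq, htl]
  have hlenB : PySem.List.len rm = ((xs.length + 1 : Nat) : Int) + 1 := by
    simp [PySem.List.len_eq, hlen, htl]
  rw [hlenA, hlenB]
  rw [key.2.1, pv_zipdiff]
  simp
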